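-- pv_equiv track=rewrite | github.com/wrschneider/advent-of-code-2023 | p03.py | find_numbers
-- ===== SOURCE A (Python) =====
-- def find_numbers(lines):
--     for r in range(0, len(lines)):
--         row = lines[r]
--         c = 0
--         while c < len(row):
--             if row[c].isdigit():
--                 # found digit
--                 c2 = c + 1
--                 while c2 < len(row) and row[c2].isdigit():
--                     c2 += 1
--                 yield(r, c, c2)
--                 c = c2
--             else: c += 1
-- ===== SOURCE B (Python) =====
-- def find_numbers(lines):
--     # boundary detection: mark digit positions, list run starts and run ends
--     # independently, and zip them (runs alternate, so they pair up in order)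
--     for r, row in enumerate(lines):
--         d = [ch.isdigit() for ch in row]
--         n = len(row)
--         starts = [i for i in range(n) if d[i] and (i == 0 or not d[i - 1])]
--         ends = [i + 1 for i in range(n) if d[i] and (i == n - 1 or not d[i + 1])]
--         for span in zip(starts, ends):
--             yield (r, span[0], span[1])
-- ===== Notes on version B (the rewrite author's own statement) =====
-- stated objective: alternative
-- what changed: B replaces A's stateful twin-pointer scan by boundary detection: it precomputes a per-row digit mask, independently filters the indices that are run starts (digit with no digit to the left) and run ends (digit with no digit to the right), and zips the two lists into spans.
import Mathlib
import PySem

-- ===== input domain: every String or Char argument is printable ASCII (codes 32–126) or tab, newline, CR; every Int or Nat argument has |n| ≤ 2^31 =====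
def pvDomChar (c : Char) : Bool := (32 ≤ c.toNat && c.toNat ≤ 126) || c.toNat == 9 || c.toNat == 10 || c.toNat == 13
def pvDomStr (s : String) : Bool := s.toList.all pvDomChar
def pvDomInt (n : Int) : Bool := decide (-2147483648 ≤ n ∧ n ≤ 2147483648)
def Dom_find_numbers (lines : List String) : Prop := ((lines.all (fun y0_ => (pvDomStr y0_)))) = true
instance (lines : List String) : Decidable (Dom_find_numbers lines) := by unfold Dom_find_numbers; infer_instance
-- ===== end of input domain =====

-- B replaces A's stateful twin-pointer scan by boundary detection on a precomputed digit mask: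
-- run starts and run ends are filtered independently and zipped; equal return values (no speed claim).

-- ===== PORT A =====
-- inner while: advance c2 while row[c2] is a digit
def fnInner (row : List Char) (c2 : Nat) : Nat :=
  if h : c2 < row.length then
    if PySem.Chars.isdigit row[c2] then fnInner row (c2 + 1) else c2
  else c2
termination_by row.length - c2

-- needed by fnOuter's termination: the inner while never moves backwards
theorem fnInner_ge (row : List Char) (c2 : Nat) : c2 ≤ fnInner row c2 := by
  unfold fnInner
  split
  · split
    · exact le_trans (Nat.le_succ c2) (fnInner_ge row (c2 + 1))
    · exact le_refl _
  · exact le_refl _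
termination_by row.length - c2

-- outer while over one row, accumulating the yielded triples
def fnOuter (r : Nat) (row : List Char) (c : Nat) (acc : List (Int × Int × Int)) :
    List (Int × Int × Int) :=
  if h : c < row.length then
    if PySem.Chars.isdigit row[c] then
      let c2 := fnInner row (c + 1)
      fnOuter r row c2 (acc ++ [((r : Int), (c : Int), (c2 : Int))])
    else fnOuter r row (c + 1) acc
  else acc
termination_by row.length - c
decreasing_by
  · have := fnInner_ge row (c + 1); omega
  · omega

def find_numbers (lines : List String) : List (Int × Int × Int) :=
  (List.range lines.length).foldl
    (fun acc r => fnOuter r (lines.getD r "").toList 0 acc) []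

-- ===== PORT B =====
-- enumerate(lines)
def pyEnum {α : Type} (k : Nat) : List α → List (Nat × α)
  | [] => []
  | x :: rest => (k, x) :: pyEnum (k + 1) rest

-- [i for i in range(n) if d[i] and (i == 0 or not d[i-1])]
def bStarts (d : List Bool) : List Nat :=
  (List.range d.length).filter (fun i => d.getD i false && (i == 0 || !(d.getD (i - 1) false)))

-- [i + 1 for i in range(n) if d[i] and (i == n - 1 or not d[i+1])]
def bEnds (d : List Bool) : List Nat :=
  ((List.range d.length).filter
    (fun i => d.getD i false && (i == d.length - 1 || !(d.getD (i + 1) false)))).map (· + 1)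

-- one row of B: digit mask, starts, ends, zip
def rowNumsB (r : Nat) (row : List Char) : List (Int × Int × Int) :=
  let d := row.map PySem.Chars.isdigit
  ((bStarts d).zip (bEnds d)).map (fun span => ((r : Int), (span.1 : Int), (span.2 : Int)))

def find_numbers_alt (lines : List String) : List (Int × Int × Int) :=
  (pyEnum 0 lines).flatMap (fun p => rowNumsB p.1 p.2.toList)

-- ===== PRECONDITION & SPEC =====
def Spec_find_numbers (lines : List String) (out : List (Int × Int × Int)) : Prop := out = find_numbers_alt lines
instance (lines : List String) (out : List (Int × Int × Int)) : Decidable (Spec_find_numbers lines out) := by unfold Spec_find_numbers; infer_instance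

-- ===== CLAIM (what is proved, stated in full; the proofs are below) =====
def Claim_equal_find_numbers : Prop := ∀ (lines : List String), Dom_find_numbers lines → Spec_find_numbers lines (find_numbers lines)

-- ===== LEMMAS AND PROOFS =====

-- common skeleton: the spans A yields for one row, by run peeling, indices from k
def spanSpec (r k : Nat) : List Char → List (Int × Int × Int)
  | [] => []
  | c :: t =>
    if PySem.Chars.isdigit c then
      ((r : Int), (k : Int), ((k + (t.takeWhile PySem.Chars.isdigit).length + 1 : Nat) : Int))
        :: spanSpec r (k + (t.takeWhile PySem.Chars.isdigit).length + 1)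
             (t.dropWhile PySem.Chars.isdigit)
    else spanSpec r (k + 1) t
termination_by l => l.length
decreasing_by
  · have := List.length_dropWhile_le (fun q => PySem.Chars.isdigit q) t
    simp; omega
  · simp

theorem drop_len_takeWhile {α : Type} (p : α → Bool) :
    ∀ l : List α, l.drop ((l.takeWhile p).length) = l.dropWhile p := by
  intro l
  induction l with
  | nil => rfl
  | cons a t ih => by_cases h : p a <;> simp [h, ih]

-- the inner while ends at c plus the length of the digit run starting at c
theorem fnInner_eq (row : List Char) (c : Nat) (h : c ≤ row.length) :
    fnInner row c = c + ((row.drop c).takeWhile PySem.Chars.isdigit).length := by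
  rw [fnInner]
  split
  · rename_i hlt
    have hdrop : row.drop c = row[c] :: row.drop (c + 1) := (List.getElem_cons_drop hlt).symm
    split
    · rename_i hd
      rw [fnInner_eq row (c + 1) (by omega), hdrop, List.takeWhile_cons, if_pos hd]
      simp only [List.length_cons]
      omega
    · rename_i hd
      rw [hdrop, List.takeWhile_cons]
      simp [hd]
  · rename_i hge
    have hnil : row.drop c = [] := List.drop_eq_nil_of_le (by omega)
    simp [hnil]
termination_by row.length - c

-- the outer while from position c appends exactly the spans of the suffix
theorem fnOuter_eq (r : Nat) (row : List Char) (c : Nat) (acc : List (Int × Int × Int))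
    (h : c ≤ row.length) :
    fnOuter r row c acc = acc ++ spanSpec r c (row.drop c) := by
  rw [fnOuter]
  split
  · rename_i hlt
    have hdrop : row.drop c = row[c] :: row.drop (c + 1) := (List.getElem_cons_drop hlt).symm
    split
    · rename_i hd
      have hc2 : fnInner row (c + 1)
          = (c + 1) + ((row.drop (c + 1)).takeWhile PySem.Chars.isdigit).length :=
        fnInner_eq row (c + 1) (by omega)
      rw [fnOuter_eq r row (fnInner row (c + 1)) _ (by
        rw [hc2]
        have h1 : ((row.drop (c+1)).takeWhile PySem.Chars.isdigit).length ≤ (row.drop (c+1)).length :=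
          List.IsPrefix.length_le (List.takeWhile_prefix _)
        have h2 : (row.drop (c+1)).length = row.length - (c+1) := by simp
        omega)]
      rw [hdrop, spanSpec]
      simp only [hd, if_pos]
      have hdd : row.drop (fnInner row (c + 1))
          = (row.drop (c + 1)).dropWhile PySem.Chars.isdigit := by
        rw [hc2, ← drop_len_takeWhile PySem.Chars.isdigit (row.drop (c + 1)), List.drop_drop]
      rw [hdd, hc2]
      have hk : (c + 1) + ((row.drop (c + 1)).takeWhile PySem.Chars.isdigit).length
          = c + ((row.drop (c + 1)).takeWhile PySem.Chars.isdigit).length + 1 := by omega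
      rw [hk]
      simp
    · rename_i hd
      rw [fnOuter_eq r row (c + 1) acc (by omega), hdrop, spanSpec]
      simp [hd]
  · rename_i hge
    have : row.drop c = [] := List.drop_eq_nil_of_le (by omega)
    simp [this, spanSpec]
termination_by row.length - c

-- recursive characterisations of B's two index filters
def sRec (prev : Bool) : List Bool → List Nat
  | [] => []
  | b :: d => (if b && !prev then [0] else []) ++ (sRec b d).map (· + 1)

def eRec : List Bool → List Nat
  | [] => []
  | b :: d => (if b && (d.isEmpty || !(d.getD 0 false)) then [1] else []) ++ (eRec d).map (· + 1)

theorem filter_starts : ∀ (d : List Bool) (prev : Bool),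
    (List.range d.length).filter
        (fun i => d.getD i false && (if i = 0 then !prev else !(d.getD (i - 1) false)))
      = sRec prev d := by
  intro d
  induction d with
  | nil => intro prev; rfl
  | cons b t ih =>
    intro prev
    rw [List.length_cons, List.range_succ_eq_map, List.filter_cons, List.filter_map]
    have hpred : ∀ i : Nat,
        ((fun i => (b :: t).getD i false &&
            (if i = 0 then !prev else !((b :: t).getD (i - 1) false))) ∘ Nat.succ) i
          = (fun i => t.getD i false && (if i = 0 then !b else !(t.getD (i - 1) false))) i := by
      intro i
      cases i with
      | zero => simp
      | succ j => simp
    rw [show ((fun i => (b :: t).getD i false &&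
          (if i = 0 then !prev else !((b :: t).getD (i - 1) false))) ∘ Nat.succ)
        = (fun i => t.getD i false && (if i = 0 then !b else !(t.getD (i - 1) false))) from
        funext hpred]
    rw [ih b, sRec]
    by_cases hb : b && !prev
    · simp [hb]
    · simp [hb]

theorem bStarts_eq (d : List Bool) : bStarts d = sRec false d := by
  rw [bStarts, ← filter_starts d false]
  apply List.filter_congr
  intro i _
  cases i <;> simp

theorem bEnds_cons (b : Bool) (d : List Bool) :
    bEnds (b :: d) = (if b && (d.isEmpty || !(d.getD 0 false)) then [1] else [])
      ++ (bEnds d).map (· + 1) := by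
  rw [bEnds, List.length_cons, Nat.add_sub_cancel, List.range_succ_eq_map,
      List.filter_cons, List.filter_map]
  have hpred : List.filter ((fun i => (b :: d).getD i false &&
        (i == d.length || !((b :: d).getD (i + 1) false))) ∘ Nat.succ)
        (List.range d.length)
      = List.filter (fun i => d.getD i false &&
          (i == d.length - 1 || !(d.getD (i + 1) false))) (List.range d.length) := by
    apply List.filter_congr
    intro i hi
    have hilt : i < d.length := List.mem_range.mp hi
    have h1 : ((i + 1 : Nat) == d.length) = (i == d.length - 1) := by
      by_cases h : i + 1 = d.length
      · have h' : i = d.length - 1 := by omega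
        subst h'
        have hgt : d.length - 1 + 1 = d.length := by omega
        rw [hgt]
        simp
      · have h2 : ¬ (i = d.length - 1) := by omega
        simp [h, h2]
    simp only [Function.comp_apply, List.getD_cons_succ, h1]
  have hz : ((b :: d).getD 0 false && ((0 : Nat) == d.length || !((b :: d).getD (0 + 1) false)))
      = (b && (d.isEmpty || !(d.getD 0 false))) := by
    cases d <;> simp
  rw [hpred, hz]
  cases hb : (b && (d.isEmpty || !(d.getD 0 false))) <;>
    simp [List.map_map, Function.comp, Nat.succ_eq_add_one, bEnds]

theorem map_shift (l : List Nat) (a b : Nat) :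
    (l.map (· + a)).map (· + b) = l.map (· + (a + b)) := by
  rw [List.map_map]
  congr 1
  funext x
  simp [Function.comp]
  omega

-- digit-run lemmas: a run of j trues followed by a non-true head
theorem sRec_true_rep : ∀ (j : Nat) (rest : List Bool), rest.headD false = false →
    sRec true (List.replicate j true ++ rest) = (sRec false rest).map (· + j) := by
  intro j
  induction j with
  | zero =>
    intro rest h
    cases rest with
    | nil => simp [sRec]
    | cons b t =>
      have hb : b = false := by simpa using h
      subst hb
      simp [sRec]
  | succ m ih =>
    intro rest h
    rw [List.replicate_succ, List.cons_append, sRec, ih rest h]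
    simp [map_shift]

theorem sRec_false_block (j : Nat) (hj : 1 ≤ j) (rest : List Bool)
    (h : rest.headD false = false) :
    sRec false (List.replicate j true ++ rest) = 0 :: (sRec false rest).map (· + j) := by
  obtain ⟨m, rfl⟩ : ∃ m, j = m + 1 := ⟨j - 1, by omega⟩
  rw [List.replicate_succ, List.cons_append, sRec, sRec_true_rep m rest h]
  simp [map_shift]

theorem eRec_block : ∀ (j : Nat), 1 ≤ j → ∀ (rest : List Bool), rest.headD false = false →
    eRec (List.replicate j true ++ rest) = j :: (eRec rest).map (· + j) := by
  intro j
  induction j with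
  | zero => intro h; omega
  | succ m ih =>
    intro _ rest h
    rw [List.replicate_succ, List.cons_append, eRec]
    cases m with
    | zero =>
      simp only [List.replicate_zero, List.nil_append]
      have hcond : rest = [] ∨ rest[0]?.getD false = false := by
        cases rest with
        | nil => exact Or.inl rfl
        | cons b t => exact Or.inr (by simpa using h)
      rcases hcond with hc | hc
      · subst hc
        simp
      · simp [hc]
    | succ p =>
      have hhead : ((List.replicate (p + 1) true ++ rest).isEmpty
          || !((List.replicate (p + 1) true ++ rest).getD 0 false)) = false := by
        simp [List.replicate_succ]
      simp only [hhead, Bool.and_false, Bool.false_eq_true, if_false, List.nil_append]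
      rw [ih (by omega) rest h]
      simp [map_shift]

-- the head of dropWhile fails the predicate (stated through the digit mask)
theorem dropWhile_mask_head (p : Char → Bool) :
    ∀ (t : List Char), ((t.dropWhile p).map p).headD false = false := by
  intro t
  induction t with
  | nil => rfl
  | cons a l ih =>
    rw [List.dropWhile_cons]
    by_cases h : p a
    · simpa [h] using ih
    · simp [h]

theorem mask_run (p : Char → Bool) : ∀ t : List Char,
    t.map p = List.replicate (t.takeWhile p).length true ++ (t.dropWhile p).map p := by
  intro t
  induction t with
  | nil => simp
  | cons a l ih =>
    by_cases ha : p a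
    · simp [ha, List.replicate_succ, ih]
    · simp [ha]

theorem mask_split (p : Char → Bool) (c : Char) (hc : p c = true) (t : List Char) :
    (c :: t).map p
      = List.replicate ((t.takeWhile p).length + 1) true ++ (t.dropWhile p).map p := by
  simp only [List.map_cons, List.replicate_succ, List.cons_append, hc]
  congr 1
  exact mask_run p t

-- main: B's zip of starts and ends computes the spans, shifted by k
theorem zip_spans (r : Nat) : ∀ (fuel : Nat) (row : List Char), row.length ≤ fuel → ∀ (k : Nat),
    ((sRec false (row.map PySem.Chars.isdigit)).zip (eRec (row.map PySem.Chars.isdigit))).map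
        (fun span => ((r : Int), ((span.1 + k : Nat) : Int), ((span.2 + k : Nat) : Int)))
      = spanSpec r k row := by
  intro fuel
  induction fuel with
  | zero =>
    intro row hlen k
    have : row = [] := List.eq_nil_of_length_eq_zero (by omega)
    subst this
    simp [sRec, eRec, spanSpec]
  | succ n ih =>
    intro row hlen k
    cases row with
    | nil => simp [sRec, eRec, spanSpec]
    | cons c t =>
      by_cases hd : PySem.Chars.isdigit c
      · -- digit run of length (t.takeWhile isdigit).length + 1
        have hmask := mask_split PySem.Chars.isdigit c hd t
        have hhead := dropWhile_mask_head PySem.Chars.isdigit t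
        have hrest : (t.dropWhile PySem.Chars.isdigit).length ≤ n := by
          have h1 := List.length_dropWhile_le PySem.Chars.isdigit t
          simp only [List.length_cons] at hlen
          omega
        rw [hmask,
            sRec_false_block ((t.takeWhile PySem.Chars.isdigit).length + 1) (by omega) _ hhead,
            eRec_block ((t.takeWhile PySem.Chars.isdigit).length + 1) (by omega) _ hhead,
            spanSpec]
        simp only [hd, if_pos]
        rw [List.zip_cons_cons, List.map_cons]
        have ih' := ih (t.dropWhile PySem.Chars.isdigit) hrest
          (k + ((t.takeWhile PySem.Chars.isdigit).length + 1))
        rw [show k + ((t.takeWhile PySem.Chars.isdigit).length + 1)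
            = k + (t.takeWhile PySem.Chars.isdigit).length + 1 from by omega] at ih'
        rw [List.zip_map, List.map_map, ← ih']
        congr 1
        · have e1 : 0 + k = k := by omega
          have e2 : (t.takeWhile PySem.Chars.isdigit).length + 1 + k
              = k + (t.takeWhile PySem.Chars.isdigit).length + 1 := by omega
          rw [e1, e2]
        · congr 1
          funext span
          have e1 : span.1 + ((t.takeWhile PySem.Chars.isdigit).length + 1) + k
              = span.1 + (k + (t.takeWhile PySem.Chars.isdigit).length + 1) := by omega
          have e2 : span.2 + ((t.takeWhile PySem.Chars.isdigit).length + 1) + k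
              = span.2 + (k + (t.takeWhile PySem.Chars.isdigit).length + 1) := by omega
          simp only [Function.comp_apply, Prod.map, Prod.mk.injEq]
          refine ⟨trivial, ?_, ?_⟩ <;> omega
      · rw [spanSpec]
        simp only [hd, if_neg, Bool.false_eq_true, not_false_iff]
        have hmask : (c :: t).map PySem.Chars.isdigit
            = false :: t.map PySem.Chars.isdigit := by simp [hd]
        rw [hmask, sRec, eRec]
        simp only [Bool.false_and, Bool.and_false, Bool.false_eq_true, if_false,
          List.nil_append]
        have hlen' : t.length ≤ n := by simp only [List.length_cons] at hlen; omega
        rw [List.zip_map, List.map_map, ← ih t hlen' (k + 1)]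
        congr 1
        funext span
        simp only [Function.comp_apply, Prod.map, Prod.mk.injEq]
        refine ⟨trivial, ?_, ?_⟩ <;> omega

theorem bEnds_eq : ∀ (d : List Bool), bEnds d = eRec d := by
  intro d
  induction d with
  | nil => rfl
  | cons b t ih => rw [bEnds_cons, ih, eRec]

theorem rowNumsB_eq (r : Nat) (row : List Char) : rowNumsB r row = spanSpec r 0 row := by
  rw [rowNumsB]
  simp only [bStarts_eq, bEnds_eq]
  rw [← zip_spans r row.length row (le_refl _) 0]
  congr 1

theorem pyEnum_shift {α : Type} : ∀ (l : List α) (k : Nat),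
    pyEnum (k + 1) l = (pyEnum k l).map (fun p => (p.1 + 1, p.2)) := by
  intro l
  induction l with
  | nil => intro k; rfl
  | cons a t ih => intro k; simp [pyEnum, ih]

theorem flat_enum : ∀ (ls : List String) (g : Nat → String → List (Int × Int × Int)),
    (List.range ls.length).flatMap (fun r => g r (ls.getD r ""))
      = (pyEnum 0 ls).flatMap (fun p => g p.1 p.2) := by
  intro ls
  induction ls with
  | nil => intro g; rfl
  | cons x t ih =>
    intro g
    rw [show (x :: t).length = t.length + 1 from rfl, List.range_succ_eq_map]
    simp only [List.flatMap_cons, List.flatMap_map]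
    rw [show pyEnum 0 (x :: t) = (0, x) :: pyEnum 1 t from rfl]
    simp only [List.flatMap_cons]
    congr 1
    simp only [Nat.succ_eq_add_one, List.getD_cons_succ]
    rw [ih (fun r s => g (r + 1) s)]
    rw [pyEnum_shift t 0, List.flatMap_map]

-- ===== VERDICT (by name: the statement is the Claim_ definition above) =====
theorem find_numbers_spec : Claim_equal_find_numbers := by
  intro lines _
  unfold Spec_find_numbers find_numbers find_numbers_alt
  rw [show (fun (acc : List (Int × Int × Int)) (r : Nat) =>
        fnOuter r (lines.getD r "").toList 0 acc)
      = (fun acc r => acc ++ spanSpec r 0 (lines.getD r "").toList) from ?_]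
  · rw [PySem.List.foldl_append_eq_flatMap, List.nil_append,
        flat_enum lines (fun r s => spanSpec r 0 s.toList)]
    congr 1
    funext p
    rw [rowNumsB_eq]
  · funext acc r
    have := fnOuter_eq r (lines.getD r "").toList 0 acc (by omega)
    simpa using this
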